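-- pv_equiv track=rewrite | github.com/nikunjpanchal22/code_clone_classification | python_t4_full/Clone_3552.py | extendedString
-- ===== SOURCE A (Python) =====
-- def extendedString(string1, string2):
--     def adjust(s1, s2):
--         return s1 + s1[-1] * (len(s2) - len(s1))
--
--     if len(string1) != len(string2):
--         if len(string1) > len(string2):
--             string2 = adjust(string2, string1)
--         else:
--             string1 = adjust(string1, string2)
--
--     return ''.join(f'{x}{y}' for x, y in zip(string1, string2))
-- ===== SOURCE B (Python) =====
-- def extendedString(string1, string2):
--     # Two staged passes split at the common length: interleave the overlap,
--     # then emit the surplus of the longer string paired with the shorter's last char.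
--     m = min(len(string1), len(string2))
--     head = ''.join(string1[i] + string2[i] for i in range(m))
--     if len(string1) > len(string2):
--         tail = ''.join(c + string2[-1] for c in string1[m:])
--     elif len(string2) > len(string1):
--         tail = ''.join(string1[-1] + c for c in string2[m:])
--     else:
--         tail = ''
--     return head + tail
-- ===== Notes on version B (the rewrite author's own statement) =====
-- stated objective: alternative
-- what changed: B replaces A's pad-then-zip with a split-at-min two-phase build: it interleaves only the common prefix, then appends the longer string's surplus paired with the shorter's last character, never constructing a padded string.
import Mathlib
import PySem

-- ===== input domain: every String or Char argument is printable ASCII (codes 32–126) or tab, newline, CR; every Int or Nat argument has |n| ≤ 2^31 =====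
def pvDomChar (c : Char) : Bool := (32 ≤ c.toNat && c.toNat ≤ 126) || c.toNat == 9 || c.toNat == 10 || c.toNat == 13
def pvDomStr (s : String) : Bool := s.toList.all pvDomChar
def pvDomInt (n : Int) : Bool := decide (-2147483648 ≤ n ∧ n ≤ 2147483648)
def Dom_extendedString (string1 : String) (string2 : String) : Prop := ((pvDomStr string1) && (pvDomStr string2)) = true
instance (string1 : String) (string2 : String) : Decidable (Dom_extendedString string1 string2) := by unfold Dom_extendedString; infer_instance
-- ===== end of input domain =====

-- B replaces A's pad-then-zip with a split-at-min two-phase build (interleave overlap, then surplus paired with the shorter's last char); same O(n) cost.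
-- Pre_ excludes inputs where the two lengths differ and the shorter string is empty: there A raises IndexError (s[-1] on ''), and B raises identically.


-- ===== PORT A =====
def extendedString (string1 : String) (string2 : String) : String :=
  let l1 := string1.toList
  let l2 := string2.toList
  -- def adjust(s1, s2): return s1 + s1[-1] * (len(s2) - len(s1))
  let adjust : List Char → List Char → List Char := fun a b =>
    match PySem.List.pyGet? a (-1) with   -- s1[-1]; none = IndexError (excluded by Pre_)
    | some c => a ++ List.replicate (b.length - a.length) c
    | none => []
  let p :=
    if l1.length ≠ l2.length then
      if l1.length > l2.length then (l1, adjust l2 l1) else (adjust l1 l2, l2)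
    else (l1, l2)
  String.mk ((p.1.zip p.2).flatMap (fun q => [q.1, q.2]))

-- ===== PORT B =====
def extendedString_alt (string1 : String) (string2 : String) : String :=
  let l1 := string1.toList
  let l2 := string2.toList
  let m := min l1.length l2.length
  let head := (List.range m).flatMap (fun i => [l1.getD i ' ', l2.getD i ' '])
  let tail :=
    if l1.length > l2.length then
      (l1.drop m).flatMap (fun c => [c, (PySem.List.pyGet? l2 (-1)).getD ' '])
    else if l2.length > l1.length then
      (l2.drop m).flatMap (fun c => [(PySem.List.pyGet? l1 (-1)).getD ' ', c])
    else []
  String.mk (head ++ tail)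

-- ===== PRECONDITION & SPEC =====
-- Pre_ excludes exactly the inputs where A raises IndexError (lengths differ and the shorter string is empty); B raises identically there.
def Pre_extendedString (string1 : String) (string2 : String) : Prop :=
  string1.toList.length = string2.toList.length ∨ (string1.toList ≠ [] ∧ string2.toList ≠ [])
instance (string1 : String) (string2 : String) : Decidable (Pre_extendedString string1 string2) := by unfold Pre_extendedString; infer_instance
def pvWitness_extendedString : String × String := ("ab", "xyz")

def Spec_extendedString (string1 : String) (string2 : String) (out : String) : Prop := out = extendedString_alt string1 string2
instance (string1 : String) (string2 : String) (out : String) : Decidable (Spec_extendedString string1 string2 out) := by unfold Spec_extendedString; infer_instance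

-- ===== CLAIM (what is proved, stated in full; the proofs are below) =====
def Claim_equal_extendedString : Prop := ∀ (string1 : String) (string2 : String), Dom_extendedString string1 string2 → Pre_extendedString string1 string2 → Spec_extendedString string1 string2 (extendedString string1 string2)

-- ===== LEMMAS AND PROOFS =====

lemma flatMap_congr_mem (l : List Nat) (f g : Nat → List Char)
    (h : ∀ i ∈ l, f i = g i) : l.flatMap f = l.flatMap g := by
  induction l with
  | nil => rfl
  | cons a t ih =>
    simp only [List.flatMap_cons, h a (by simp),
      ih (fun i hi => h i (by simp [hi]))]

lemma zip_flat_eq_range (l1 : List Char) : ∀ (l2 : List Char), l1.length = l2.length →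
    ((l1.zip l2).flatMap fun q => [q.1, q.2])
      = (List.range l1.length).flatMap (fun i => [l1.getD i ' ', l2.getD i ' ']) := by
  induction l1 with
  | nil => intro l2 h; cases l2 <;> simp_all
  | cons a t ih =>
    intro l2 h
    cases l2 with
    | nil => simp at h
    | cons b u =>
      have ht : t.length = u.length := by simpa using h
      simp only [List.zip_cons_cons, List.flatMap_cons, List.length_cons,
        List.range_succ_eq_map, List.flatMap_map, List.getD_cons_zero,
        List.getD_cons_succ]
      rw [ih u ht]

lemma flatMap_eq_range (u : List Char) (f : Char → List Char) :
    u.flatMap f = (List.range u.length).flatMap (fun j => f (u.getD j ' ')) := by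
  induction u with
  | nil => rfl
  | cons a t ih =>
    simp only [List.flatMap_cons, List.length_cons, List.range_succ_eq_map,
      List.flatMap_map, List.getD_cons_zero, List.getD_cons_succ]
    rw [ih]

lemma pad_getD (l : List Char) (c : Char) (k i : Nat) (hik : i < l.length + k) :
    (l ++ List.replicate k c).getD i ' ' = if i < l.length then l.getD i ' ' else c := by
  by_cases hil : i < l.length
  · rw [if_pos hil, List.getD_eq_getElem?_getD, List.getD_eq_getElem?_getD,
      List.getElem?_append_left hil]
  · rw [if_neg hil, List.getD_eq_getElem?_getD,
      List.getElem?_append_right (by omega), List.getElem?_replicate, if_pos (by omega)]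
    rfl

lemma getD_drop (l : List Char) (m j : Nat) :
    (l.drop m).getD j ' ' = l.getD (m + j) ' ' := by
  rw [List.getD_eq_getElem?_getD, List.getD_eq_getElem?_getD, List.getElem?_drop]

theorem extendedString_spec : Claim_equal_extendedString := by
  intro s1 s2 _ hpre
  show extendedString s1 s2 = extendedString_alt s1 s2
  unfold extendedString extendedString_alt
  simp only []
  rcases Nat.lt_trichotomy s1.toList.length s2.toList.length with hlt | heq | hgt
  · -- s1 shorter: A pads s1; B's head covers s1, tail pairs s1's last char with s2's surplus
    have h1 : s1.toList ≠ [] := by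
      rcases hpre with h | ⟨h1, _⟩
      · exact absurd h (by omega)
      · exact h1
    obtain ⟨c, hc⟩ := Option.isSome_iff_exists.mp
      ((List.getLast?_isSome (l := s1.toList)).mpr h1)
    have hget : PySem.List.pyGet? s1.toList (-1) = some c := by
      rw [PySem.List.pyGet?_neg_one, hc]
    have hne : s1.toList.length ≠ s2.toList.length := by omega
    have hngt : ¬ s1.toList.length > s2.toList.length := by omega
    have hmin : min s1.toList.length s2.toList.length = s1.toList.length := by omega
    simp only [if_pos hne, if_neg hngt, hget, if_pos hlt, hmin]
    have hlen : (s1.toList ++ List.replicate (s2.toList.length - s1.toList.length) c).length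
        = s2.toList.length := by
      simp only [List.length_append, List.length_replicate]; omega
    rw [zip_flat_eq_range _ _ hlen, hlen]
    rw [flatMap_eq_range (s2.toList.drop s1.toList.length)]
    have hdl : (s2.toList.drop s1.toList.length).length
        = s2.toList.length - s1.toList.length := by simp
    rw [hdl]
    have hsplit : s2.toList.length
        = s1.toList.length + (s2.toList.length - s1.toList.length) := by omega
    rw [hsplit, List.range_add, List.flatMap_append, List.flatMap_map]
    simp only [Nat.add_sub_cancel_left]
    congr 1
    congr 1
    · apply flatMap_congr_mem
      intro i hi
      have hiL : i < s1.toList.length := by simpa using hi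
      rw [pad_getD _ _ _ _ (by omega), if_pos hiL]
    · apply flatMap_congr_mem
      intro j hj
      have hjL : j < s2.toList.length - s1.toList.length := by simpa using hj
      rw [pad_getD _ _ _ _ (by omega), if_neg (by omega), getD_drop]
      simp only [Option.getD_some]
  · -- equal lengths: tail empty, head is the full zip
    have hne : ¬ s1.toList.length ≠ s2.toList.length := by omega
    have hngt : ¬ s1.toList.length > s2.toList.length := by omega
    have hnlt : ¬ s2.toList.length > s1.toList.length := by omega
    have hmin : min s1.toList.length s2.toList.length = s1.toList.length := by omega
    simp only [if_neg hne, if_neg hngt, if_neg hnlt, hmin, List.append_nil]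
    rw [zip_flat_eq_range _ _ heq]
  · -- s2 shorter: symmetric
    have h2 : s2.toList ≠ [] := by
      rcases hpre with h | ⟨_, h2⟩
      · exact absurd h (by omega)
      · exact h2
    obtain ⟨c, hc⟩ := Option.isSome_iff_exists.mp
      ((List.getLast?_isSome (l := s2.toList)).mpr h2)
    have hget : PySem.List.pyGet? s2.toList (-1) = some c := by
      rw [PySem.List.pyGet?_neg_one, hc]
    have hne : s1.toList.length ≠ s2.toList.length := by omega
    have hgt' : s1.toList.length > s2.toList.length := by omega
    have hmin : min s1.toList.length s2.toList.length = s2.toList.length := by omega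
    simp only [if_pos hne, if_pos hgt', hget, hmin]
    have hlen : s1.toList.length
        = (s2.toList ++ List.replicate (s1.toList.length - s2.toList.length) c).length := by
      simp only [List.length_append, List.length_replicate]; omega
    rw [zip_flat_eq_range _ _ hlen]
    rw [flatMap_eq_range (s1.toList.drop s2.toList.length)]
    have hdl : (s1.toList.drop s2.toList.length).length
        = s1.toList.length - s2.toList.length := by simp
    rw [hdl]
    have hsplit : s1.toList.length
        = s2.toList.length + (s1.toList.length - s2.toList.length) := by omega
    rw [hsplit, List.range_add, List.flatMap_append, List.flatMap_map]
    simp only [Nat.add_sub_cancel_left]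
    congr 1
    congr 1
    · apply flatMap_congr_mem
      intro i hi
      have hiL : i < s2.toList.length := by simpa using hi
      rw [pad_getD _ _ _ _ (by omega), if_pos hiL]
    · apply flatMap_congr_mem
      intro j hj
      have hjL : j < s1.toList.length - s2.toList.length := by simpa using hj
      rw [pad_getD _ _ _ _ (by omega), if_neg (by omega), getD_drop]
      simp only [Option.getD_some]
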